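-- pv_equiv track=rewrite | github.com/gandalf15/trustpilot_md5 | dict_loader.py | contains_letters
-- ===== SOURCE A (Python) =====
-- import collections
--
-- def contains_letters(string_1: str, string_2: str) -> bool:
--     """
--     Check if all the letters of string_1 are also in string_2.
--
--     Args:
--         string_1: String letters are checked against string_2
--         string_2: String that is provided as target.
--
--     Returns: True if all the letters in string_1 are also present in string_2
--     """
--     letters_counter = collections.Counter(string_2)
--     for letter in string_1:
--         if letter in letters_counter and letters_counter[letter] > 0:
--             letters_counter[letter] -= 1
--         else:
--             return False
--     return True
-- ===== SOURCE B (Python) =====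
-- import collections
--
-- def contains_letters(string_1: str, string_2: str) -> bool:
--     """Build full Counters for both strings, then compare the tables."""
--     need = collections.Counter(string_1)
--     have = collections.Counter(string_2)
--     return all(have[ch] >= cnt for ch, cnt in need.items())
-- ===== Notes on version B (the rewrite author's own statement) =====
-- stated objective: idiomatic
-- what changed: Replaces the streaming decrement-and-early-return loop over string_1 with building full Counters of both strings once and a single table comparison (every needed count <= available count), with no mutation or early exit.
import Mathlib
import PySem

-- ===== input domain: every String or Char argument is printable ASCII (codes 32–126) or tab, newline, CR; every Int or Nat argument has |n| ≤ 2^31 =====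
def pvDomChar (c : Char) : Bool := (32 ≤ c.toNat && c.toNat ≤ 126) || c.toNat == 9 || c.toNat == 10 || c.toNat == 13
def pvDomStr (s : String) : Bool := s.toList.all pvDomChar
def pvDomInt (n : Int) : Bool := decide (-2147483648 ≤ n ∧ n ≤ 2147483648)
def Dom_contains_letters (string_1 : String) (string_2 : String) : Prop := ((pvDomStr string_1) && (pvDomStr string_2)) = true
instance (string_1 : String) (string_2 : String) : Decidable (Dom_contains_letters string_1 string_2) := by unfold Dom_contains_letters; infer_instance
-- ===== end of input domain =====

-- B builds full Counters of both strings and compares the tables, instead of A's streaming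
-- decrement-with-early-return loop (objective: idiomatic). Same return value on all inputs.

-- ===== PORT A =====
-- the 'for letter in string_1' loop, with its early 'return False'
def containsLettersLoopA (d : PySem.Dict Char Int) : List Char → Bool
  | [] => true
  | c :: rest =>
      if d.contains c && decide (0 < d.getD c 0) then
        containsLettersLoopA (d.modify c 0 (· - 1)) rest
      else
        false

def contains_letters (string_1 : String) (string_2 : String) : Bool :=
  let letters_counter := PySem.Dict.counter string_2.toList
  containsLettersLoopA letters_counter string_1.toList

-- ===== PORT B =====
def contains_letters_alt (string_1 : String) (string_2 : String) : Bool :=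
  let need := PySem.Dict.counter string_1.toList
  let haveC := PySem.Dict.counter string_2.toList
  need.items.all (fun p => haveC.getD p.1 0 ≥ p.2)

-- ===== PRECONDITION & SPEC =====
def Spec_contains_letters (string_1 : String) (string_2 : String) (out : Bool) : Prop := out = contains_letters_alt string_1 string_2
instance (string_1 : String) (string_2 : String) (out : Bool) : Decidable (Spec_contains_letters string_1 string_2 out) := by unfold Spec_contains_letters; infer_instance

-- ===== CLAIM (what is proved, stated in full; the proofs are below) =====
def Claim_equal_contains_letters : Prop := ∀ (string_1 : String) (string_2 : String), Dom_contains_letters string_1 string_2 → Spec_contains_letters string_1 string_2 (contains_letters string_1 string_2)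

-- ===== LEMMAS AND PROOFS =====

-- A's loop, over a table with nonnegative counts, succeeds iff every needed multiplicity is available.
theorem containsLettersLoopA_eq (l : List Char) (d : PySem.Dict Char Int)
    (h : ∀ c, 0 ≤ d.getD c 0) :
    containsLettersLoopA d l = decide (∀ c ∈ l, (l.count c : Int) ≤ d.getD c 0) := by
  induction l generalizing d with
  | nil => simp [containsLettersLoopA]
  | cons c rest ih =>
      have hcond : (d.contains c && decide (0 < d.getD c 0)) = decide (0 < d.getD c 0) := by
        by_cases hc : d.contains c = true
        · simp [hc]
        · have h0 : d.getD c 0 = 0 :=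
            PySem.Dict.getD_of_not_contains d 0 (by simpa using hc)
          simp [Bool.eq_false_iff.mpr hc, h0]
      rw [containsLettersLoopA, hcond]
      by_cases hpos : 0 < d.getD c 0
      · have hnn : ∀ x, 0 ≤ (d.modify c 0 (· - 1)).getD x 0 := by
          intro x
          rw [PySem.Dict.getD_modify]
          split_ifs with hx
          · subst hx; omega
          · exact h x
        rw [if_pos (by simpa using hpos), ih _ hnn]
        apply decide_eq_decide.2
        constructor
        · intro hall x hx
          rcases List.mem_cons.1 hx with hxc | hxr
          · subst hxc
            by_cases hcr : x ∈ rest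
            · have := hall x hcr
              rw [PySem.Dict.getD_modify, if_pos rfl] at this
              simp only [List.count_cons, beq_self_eq_true, if_true]
              push_cast
              omega
            · have : rest.count x = 0 := List.count_eq_zero.2 hcr
              simp only [List.count_cons, beq_self_eq_true, if_true, this]
              push_cast
              omega
          · have := hall x hxr
            rw [PySem.Dict.getD_modify] at this
            by_cases hxc : x = c
            · subst hxc
              rw [if_pos rfl] at this
              simp only [List.count_cons, beq_self_eq_true, if_true]
              push_cast
              omega
            · rw [if_neg hxc] at this
              have hcount : (c :: rest).count x = rest.count x := by
                simp [Ne.symm hxc]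
              rw [hcount]
              exact this
        · intro hall x hx
          have hmem : x ∈ c :: rest := List.mem_cons_of_mem c hx
          have := hall x hmem
          rw [PySem.Dict.getD_modify]
          by_cases hxc : x = c
          · subst hxc
            rw [if_pos rfl]
            simp only [List.count_cons, beq_self_eq_true, if_true] at this
            push_cast at this ⊢
            omega
          · rw [if_neg hxc]
            have hcount : (c :: rest).count x = rest.count x := by
              simp [Ne.symm hxc]
            rw [hcount] at this
            exact this
      · rw [if_neg (by simpa using hpos)]
        have hc0 : d.getD c 0 = 0 := le_antisymm (by omega) (h c)
        symm
        apply decide_eq_false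
        intro hall
        have := hall c (List.mem_cons_self)
        rw [hc0] at this
        have h1 : 1 ≤ (c :: rest).count c := List.count_pos_iff.2 List.mem_cons_self
        omega

-- B equals the same comparison of multiplicities.
theorem contains_letters_alt_eq (s1 s2 : String) :
    contains_letters_alt s1 s2
      = decide (∀ c ∈ s1.toList, (s1.toList.count c : Int) ≤ (s2.toList.count c : Int)) := by
  unfold contains_letters_alt
  simp only [PySem.Dict.items_counter, List.all_map]
  apply Bool.eq_iff_iff.2
  simp only [List.all_eq_true, Function.comp_apply, decide_eq_true_eq,
    PySem.Dict.getD_counter, ge_iff_le]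
  constructor
  · intro hall c hc
    exact hall c ((PySem.Set.mem_ofList _ _).2 hc)
  · intro hall c hc
    exact hall c ((PySem.Set.mem_ofList _ _).1 hc)

-- ===== VERDICT (by name: the statement is the Claim_ definition above) =====
theorem contains_letters_spec : Claim_equal_contains_letters := by
  intro s1 s2 _
  unfold Spec_contains_letters contains_letters
  rw [containsLettersLoopA_eq _ _ (fun c => by
        rw [PySem.Dict.getD_counter]; exact_mod_cast Int.natCast_nonneg _),
      contains_letters_alt_eq]
  apply decide_eq_decide.2
  constructor
  · intro hall c hc
    have := hall c hc
    rwa [PySem.Dict.getD_counter] at this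
  · intro hall c hc
    rw [PySem.Dict.getD_counter]
    exact hall c hc
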